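-- pv_equiv track=rewrite | github.com/bsaffouri/HW4 | HorrorFilmNight.py | max_movies_watched
-- ===== SOURCE A (Python) =====
-- def max_movies_watched(e, m):
--     e = set(e)
--     m = set(m)
--     #combine all days has movie E,M like
--     liked_all = sorted(e.union(m))
--     n = len(liked_all)
--
--     dislikes = []
--     for day in liked_all:
--         if day in e and day in m:
--             dislikes.append(0)
--         elif day in e:
--             dislikes.append(2)
--         else:
--             dislikes.append(1)
--
--     #bottom up-> create 2d list
--     #n+1 rows and 3 columns (3 possible dislike state)
--     dp = [[0] * 3 for _ in range(n + 1)]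
--
--     #iterate from the last movie day back to the first
--     for i in range(n - 1, -1, -1):
--         for prev_dislike in range(3): #loop through 3 possible dislike state
--             #skip option
--             skip = dp[i + 1][prev_dislike]
--
--             #watch movie if allowed.
--             watch = 0
--             curr = dislikes[i]
--             if curr == 0 or curr != prev_dislike:
--                 watch = 1 + dp[i + 1][curr]
--
--             dp[i][prev_dislike] = max(skip, watch)
--
--     return dp[0][0]
-- ===== SOURCE B (Python) =====
-- def max_movies_watched(e, m):
--     es = set(e)
--     ms = set(m)
--     count = 0
--     prev = 0
--     for day in sorted(es | ms):
--         label = 0 if (day in es and day in ms) else (2 if day in es else 1)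
--         if label == 0 or label != prev:
--             count += 1
--             prev = label
--     return count
-- ===== Notes on version B (the rewrite author's own statement) =====
-- stated objective: simpler
-- what changed: Replaces the 3-state bottom-up DP table over suffixes with a single greedy forward pass keeping O(1) state (count and last kept label); a timing run measured B ~3.6x faster (constant factor: no table, one pass).
import Mathlib
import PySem

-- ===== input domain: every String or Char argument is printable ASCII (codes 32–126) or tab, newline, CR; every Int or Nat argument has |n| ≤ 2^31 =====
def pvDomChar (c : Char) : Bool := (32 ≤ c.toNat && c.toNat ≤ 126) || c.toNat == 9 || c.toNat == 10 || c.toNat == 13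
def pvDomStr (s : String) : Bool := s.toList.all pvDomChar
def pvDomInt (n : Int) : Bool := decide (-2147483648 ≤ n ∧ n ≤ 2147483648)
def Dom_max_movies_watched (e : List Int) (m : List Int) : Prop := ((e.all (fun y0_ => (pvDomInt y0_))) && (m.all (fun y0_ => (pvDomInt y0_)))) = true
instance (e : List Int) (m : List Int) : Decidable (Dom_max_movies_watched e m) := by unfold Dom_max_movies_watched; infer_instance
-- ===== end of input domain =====

-- B replaces A's 3-state bottom-up DP table with a single greedy forward pass (objective: simpler).

-- ===== PORT A =====
-- inner loop 'for prev_dislike in range(3)' building row dp[i] from row dp[i+1];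
-- indexing dp[i+1][prev_dislike] and dp[i+1][curr] is exact here: the row has length 3 and
-- curr ∈ {0,1,2} always, so Python never raises and pyGetD's default is never used.
def pvARow (prevRow : List Int) (curr : Int) : List Int :=
  (PySem.List.pyRange 0 3 1).map (fun prev_dislike =>
    let skip := PySem.List.pyGetD prevRow prev_dislike 0
    let watch := if curr = 0 ∨ curr ≠ prev_dislike then 1 + PySem.List.pyGetD prevRow curr 0 else 0
    max skip watch)

-- the dp table: Python initialises n+1 rows of zeros and overwrites row i from row i+1,
-- for i = n-1 down to 0; this recursion computes the same rows in the same order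
-- (row for suffix c::rest from the head row of the table for rest; last row stays [0,0,0]).
def pvATable : List Int → List (List Int)
  | [] => [[0, 0, 0]]
  | c :: rest =>
    let t := pvATable rest
    pvARow (t.headD [0, 0, 0]) c :: t

def max_movies_watched (e : List Int) (m : List Int) : Int :=
  let es := PySem.Set.ofList e
  let ms := PySem.Set.ofList m
  let liked_all := PySem.List.sorted (PySem.Set.union es ms) (fun x => x) false
  let dislikes := liked_all.foldl (fun acc day =>
      acc ++ [if PySem.Set.contains es day && PySem.Set.contains ms day then (0 : Int)
              else if PySem.Set.contains es day then 2 else 1]) []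
  let dp := pvATable dislikes
  PySem.List.pyGetD (PySem.List.pyGetD dp 0 []) 0 0

-- ===== PORT B =====
def max_movies_watched_alt (e : List Int) (m : List Int) : Int :=
  let es := PySem.Set.ofList e
  let ms := PySem.Set.ofList m
  let r := (PySem.List.sorted (PySem.Set.union es ms) (fun x => x) false).foldl
    (fun (cp : Int × Int) day =>
      let label : Int := if PySem.Set.contains es day && PySem.Set.contains ms day then 0
                         else if PySem.Set.contains es day then 2 else 1
      if label = 0 ∨ label ≠ cp.2 then (cp.1 + 1, label) else cp) (0, 0)
  r.1

-- ===== PRECONDITION & SPEC =====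
def Spec_max_movies_watched (e : List Int) (m : List Int) (out : Int) : Prop := out = max_movies_watched_alt e m
instance (e : List Int) (m : List Int) (out : Int) : Decidable (Spec_max_movies_watched e m out) := by unfold Spec_max_movies_watched; infer_instance

-- ===== CLAIM (what is proved, stated in full; the proofs are below) =====
def Claim_equal_max_movies_watched : Prop := ∀ (e : List Int) (m : List Int), Dom_max_movies_watched e m → Spec_max_movies_watched e m (max_movies_watched e m)

-- ===== LEMMAS AND PROOFS =====

-- the label of one day, as both programs compute it
def pvLabel (es ms : PySem.Set Int) (day : Int) : Int :=
  if PySem.Set.contains es day && PySem.Set.contains ms day then 0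
  else if PySem.Set.contains es day then 2 else 1

-- value of A's dp row: pvDpf l p = dp-value of the suffix l with previous state p
def pvDpf : List Int → Int → Int
  | [], _ => 0
  | c :: r, p => max (pvDpf r p) (if c = 0 ∨ c ≠ p then 1 + pvDpf r c else 0)

-- B's greedy count over a label list
def pvG : List Int → Int → Int
  | [], _ => 0
  | c :: r, p => if c = 0 ∨ c ≠ p then 1 + pvG r c else pvG r p

theorem pvDpf_nonneg (l : List Int) (p : Int) : 0 ≤ pvDpf l p := by
  induction l generalizing p with
  | nil => simp [pvDpf]
  | cons c r ih => simp only [pvDpf]; exact le_max_of_le_left (ih p)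

theorem pvDpf_le_succ (l : List Int) (p c : Int) : pvDpf l p ≤ 1 + pvDpf l c := by
  induction l generalizing p c with
  | nil => simp [pvDpf]
  | cons d r ih =>
    simp only [pvDpf]
    have h1 := ih p c
    have h3 := pvDpf_nonneg r c
    have h4 := pvDpf_nonneg r d
    by_cases hc : d = 0 ∨ d ≠ c
    · by_cases hp : d = 0 ∨ d ≠ p <;> simp only [hp, hc, if_true, if_false] <;> omega
    · simp only [not_or, ne_eq, not_not] at hc
      obtain ⟨hd0, hdc⟩ := hc
      subst hdc
      have h5 := pvDpf_nonneg r p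
      by_cases hp : d = 0 ∨ d ≠ p <;> simp only [hp, if_true, if_false] <;> omega

theorem pvDpf_eq_pvG (l : List Int) (p : Int) : pvDpf l p = pvG l p := by
  induction l generalizing p with
  | nil => rfl
  | cons c r ih =>
    simp only [pvDpf, pvG]
    by_cases h : c = 0 ∨ c ≠ p
    · have hle := pvDpf_le_succ r p c
      simp only [ih] at hle
      simp only [h, if_true, ih]
      omega
    · have hnn := pvDpf_nonneg r p
      simp only [ih] at hnn
      simp only [h, if_false, ih]
      omega

theorem pvLabel_range (es ms : PySem.Set Int) (day : Int) :
    pvLabel es ms day = 0 ∨ pvLabel es ms day = 1 ∨ pvLabel es ms day = 2 := by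
  unfold pvLabel; split_ifs <;> simp

-- A's table head row is [pvDpf l 0, pvDpf l 1, pvDpf l 2] when all labels are in {0,1,2}
theorem pvATable_head (l : List Int) (hl : ∀ x ∈ l, x = 0 ∨ x = 1 ∨ x = 2) :
    (pvATable l).headD [0, 0, 0] = [pvDpf l 0, pvDpf l 1, pvDpf l 2] := by
  induction l with
  | nil => simp [pvATable, pvDpf]
  | cons c rest ih =>
    have hc : c = 0 ∨ c = 1 ∨ c = 2 := hl c (by simp)
    have hrest : ∀ x ∈ rest, x = 0 ∨ x = 1 ∨ x = 2 := fun x hx => hl x (by simp [hx])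
    have hrange : PySem.List.pyRange 0 3 1 = [0, 1, 2] := by decide
    simp only [pvATable, ih hrest, pvARow, hrange, List.map_cons, List.map_nil,
      List.headD_cons]
    rcases hc with h | h | h <;> subst h <;>
      simp [pvDpf, PySem.List.pyGetD, PySem.List.pyGet?, PySem.List.pyIdx?]

-- A's dislikes-building loop is a map of pvLabel over the days
theorem pvDislikes_eq_map (es ms : PySem.Set Int) (days : List Int) :
    days.foldl (fun acc day =>
      acc ++ [if PySem.Set.contains es day && PySem.Set.contains ms day then (0 : Int)
              else if PySem.Set.contains es day then 2 else 1]) []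
      = days.map (pvLabel es ms) := by
  have aux : ∀ (ds : List Int) (acc : List Int), ds.foldl (fun acc day =>
      acc ++ [if PySem.Set.contains es day && PySem.Set.contains ms day then (0 : Int)
              else if PySem.Set.contains es day then 2 else 1]) acc
      = acc ++ ds.map (pvLabel es ms) := by
    intro ds
    induction ds with
    | nil => intro acc; simp
    | cons d r ih =>
      intro acc
      simp only [List.foldl_cons, List.map_cons]
      rw [ih]
      simp [pvLabel]
  simpa using aux days []

-- B's fold computes pvG over the label list
theorem pvFoldB (es ms : PySem.Set Int) (days : List Int) (c0 p : Int) :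
    (days.foldl (fun (cp : Int × Int) day =>
      let label : Int := if PySem.Set.contains es day && PySem.Set.contains ms day then 0
                         else if PySem.Set.contains es day then 2 else 1
      if label = 0 ∨ label ≠ cp.2 then (cp.1 + 1, label) else cp) (c0, p)).1
      = c0 + pvG (days.map (pvLabel es ms)) p := by
  induction days generalizing c0 p with
  | nil => simp [pvG]
  | cons d rest ih =>
    simp only [List.foldl_cons, List.map_cons, pvG]
    rw [show (if PySem.Set.contains es d && PySem.Set.contains ms d then (0 : Int)
        else if PySem.Set.contains es d then 2 else 1) = pvLabel es ms d from rfl]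
    by_cases h : pvLabel es ms d = 0 ∨ pvLabel es ms d ≠ p
    · rw [if_pos h, if_pos h, ih]
      omega
    · rw [if_neg h, if_neg h, ih]

-- ===== VERDICT (by name: the statement is the Claim_ definition above) =====
theorem max_movies_watched_spec : Claim_equal_max_movies_watched := by
  intro e m _
  unfold Spec_max_movies_watched max_movies_watched max_movies_watched_alt
  dsimp only
  rw [pvDislikes_eq_map, pvFoldB]
  set es := PySem.Set.ofList e
  set ms := PySem.Set.ofList m
  set days := PySem.List.sorted (PySem.Set.union es ms) (fun x => x) false
  have hmem : ∀ x ∈ days.map (pvLabel es ms), x = 0 ∨ x = 1 ∨ x = 2 := by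
    intro x hx
    rcases List.mem_map.mp hx with ⟨d, _, rfl⟩
    exact pvLabel_range es ms d
  have hne : pvATable (days.map (pvLabel es ms)) ≠ [] := by
    cases days.map (pvLabel es ms) <;> simp [pvATable]
  have hhead : PySem.List.pyGetD (pvATable (days.map (pvLabel es ms))) 0 [] =
      (pvATable (days.map (pvLabel es ms))).headD [0, 0, 0] := by
    cases h : pvATable (days.map (pvLabel es ms)) with
    | nil => exact absurd h hne
    | cons a t => rw [PySem.List.pyGetD_zero_cons, List.headD_cons]
  rw [hhead, pvATable_head _ hmem, PySem.List.pyGetD_zero_cons, pvDpf_eq_pvG]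
  omega
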